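-- pv_equiv track=rewrite | github.com/MrBrantCode/unitest_baseline | mut_generate/mist_train_cf/cf_92753/solution.py | delete_chars
-- ===== SOURCE A (Python) =====
-- def delete_chars(A, B):
--     C = ''
--     prev_char = None
--
--     for char in A:
--         if char not in B and char != prev_char:
--             C += char
--         prev_char = char
--
--     return C
-- ===== SOURCE B (Python) =====
-- def delete_chars(A, B):
--     out = []
--     i = 0
--     n = len(A)
--     while i < n:
--         c = A[i]
--         if c not in B:
--             out.append(c)
--         while i < n and A[i] == c:
--             i += 1
--     return ''.join(out)
-- ===== Notes on version B (the rewrite author's own statement) =====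
-- stated objective: alternative
-- what changed: B iterates over runs of equal characters with a two-pointer while loop (taking one representative per run, kept iff not in B), instead of A's per-character scan carrying a prev_char accumulator and conditional string concatenation.
import Mathlib
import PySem

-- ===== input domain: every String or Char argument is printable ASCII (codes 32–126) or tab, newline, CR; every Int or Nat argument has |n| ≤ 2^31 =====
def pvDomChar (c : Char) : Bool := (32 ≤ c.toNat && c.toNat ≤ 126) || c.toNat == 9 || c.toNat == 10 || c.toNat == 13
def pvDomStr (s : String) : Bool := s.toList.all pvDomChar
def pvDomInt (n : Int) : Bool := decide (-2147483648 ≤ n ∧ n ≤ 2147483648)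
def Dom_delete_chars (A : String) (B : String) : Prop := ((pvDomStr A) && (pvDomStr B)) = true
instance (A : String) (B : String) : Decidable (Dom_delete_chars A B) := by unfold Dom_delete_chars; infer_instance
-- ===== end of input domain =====

-- B iterates over runs of equal characters (one representative per run, kept iff not in B);
-- A scans per character with a prev_char accumulator. Same return value; 'alternative' objective.

-- ===== PORT A =====
-- A's loop: state (C, prev_char); append char when char ∉ B and char ≠ prev_char.
def delete_chars (A : String) (B : String) : String :=
  (A.toList.foldl
    (fun (st : List Char × Option Char) char =>
      (if char ∉ B.toList ∧ some char ≠ st.2 then st.1 ++ [char] else st.1, some char))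
    ([], none)).1 |> String.mk

-- ===== PORT B =====
-- Source B's outer while loop: take the first char of the current run, keep it iff not in B,
-- then advance the index past the whole run (= dropWhile over the remaining list).
def delete_chars_altRuns (Bl : List Char) : List Char → List Char
  | [] => []
  | c :: rest =>
      (if c ∈ Bl then [] else [c]) ++ delete_chars_altRuns Bl (rest.dropWhile (· == c))
termination_by l => l.length
decreasing_by
  simpa using Nat.lt_succ_of_le (List.length_dropWhile_le (· == c) rest)

def delete_chars_alt (A : String) (B : String) : String :=
  String.mk (delete_chars_altRuns B.toList A.toList)

-- ===== PRECONDITION & SPEC =====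
def Spec_delete_chars (A : String) (B : String) (out : String) : Prop := out = delete_chars_alt A B
instance (A : String) (B : String) (out : String) : Decidable (Spec_delete_chars A B out) := by unfold Spec_delete_chars; infer_instance

-- ===== CLAIM (what is proved, stated in full; the proofs are below) =====
def Claim_equal_delete_chars : Prop := ∀ (A : String) (B : String), Dom_delete_chars A B → Spec_delete_chars A B (delete_chars A B)

-- ===== LEMMAS AND PROOFS =====

-- A's loop body, written as a prev-state recursion (proof-only helper).
def pvG (Bl : List Char) : Option Char → List Char → List Char
  | _, [] => []
  | p, c :: rest => (if c ∉ Bl ∧ some c ≠ p then [c] else []) ++ pvG Bl (some c) rest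

theorem pvFoldl_eq_pvG (Bl : List Char) (l : List Char) (acc : List Char) (p : Option Char) :
    (l.foldl
      (fun (st : List Char × Option Char) char =>
        (if char ∉ Bl ∧ some char ≠ st.2 then st.1 ++ [char] else st.1, some char))
      (acc, p)).1 = acc ++ pvG Bl p l := by
  induction l generalizing acc p with
  | nil => simp [pvG]
  | cons c rest ih =>
      simp only [List.foldl, pvG]
      by_cases h : c ∉ Bl ∧ some c ≠ p <;> simp [h, ih, List.append_assoc]

theorem pvG_some_eq_runs (Bl : List Char) (rest : List Char) (c : Char) :
    pvG Bl (some c) rest = delete_chars_altRuns Bl (rest.dropWhile (· == c)) := by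
  induction rest generalizing c with
  | nil => simp [pvG, delete_chars_altRuns]
  | cons d t ih =>
      by_cases hdc : d = c
      · subst hdc
        simp only [pvG, List.dropWhile]
        simp [ih d]
      · have hbeq : (d == c) = false := by simp [hdc]
        simp only [pvG, List.dropWhile, hbeq, delete_chars_altRuns]
        by_cases hb : d ∈ Bl
        · simp [hb, hdc, ih d]
        · simp [hb, hdc, ih d]

theorem pvG_none_eq_runs (Bl : List Char) (l : List Char) :
    pvG Bl none l = delete_chars_altRuns Bl l := by
  cases l with
  | nil => simp [pvG, delete_chars_altRuns]
  | cons c rest =>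
      simp only [pvG, delete_chars_altRuns, pvG_some_eq_runs]
      by_cases hb : c ∈ Bl <;> simp [hb]

-- ===== VERDICT (by name: the statement is the Claim_ definition above) =====
theorem delete_chars_spec : Claim_equal_delete_chars := by
  intro A B _
  unfold Spec_delete_chars delete_chars delete_chars_alt
  rw [pvFoldl_eq_pvG, pvG_none_eq_runs]
  simp
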